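-- pv_equiv track=rewrite | github.com/saltie2193/aoc2022 | day09/part2.py | grid_to_str
-- ===== SOURCE A (Python) =====
-- def grid_to_str(rope: list[tuple[int, int]], visited: set[tuple[int, int]]) -> str:
--     upper, right, lower, left = 0, 0, 0, 0
--     for row, col in [*rope, *visited]:
--         if row > upper:
--             upper = row
--         elif row < lower:
--             lower = row
--
--         if col > right:
--             right = col
--         elif col < left:
--             left = col
--
--     offset_row = abs(lower)
--     offset_col = abs(left)
--
--     lines: list[list[str]] = []
--     for row in range(lower, upper + 1):
--         lines.append([])
--         for col in range(left, right + 1):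
--             if (row, col) in visited:
--                 lines[row + offset_row].append("#")
--             else:
--                 lines[row + offset_row].append(".")
--
--     lines[offset_row][offset_col] = "S"
--
--     for i, (row, col) in enumerate(reversed(rope)):
--         v = len(rope) - i - 1
--         lines[row + offset_row][col + offset_col] = str(v) if v != 0 else "H"
--
--     return "\n".join("".join(line) for line in lines)
-- ===== SOURCE B (Python) =====
-- def grid_to_str(rope, visited):
--     rows = [0] + [r for r, _ in rope] + [r for r, _ in visited]
--     cols = [0] + [c for _, c in rope] + [c for _, c in visited]
--     lower, upper = min(rows), max(rows)
--     left, right = min(cols), max(cols)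
--
--     knot = {}
--     for v, p in enumerate(rope):
--         if p not in knot:
--             knot[p] = "H" if v == 0 else str(v)
--
--     def cell(p):
--         if p in knot:
--             return knot[p]
--         if p == (0, 0):
--             return "S"
--         if p in visited:
--             return "#"
--         return "."
--
--     return "\n".join(
--         "".join(cell((r, c)) for c in range(left, right + 1))
--         for r in range(lower, upper + 1)
--     )
-- ===== Notes on version B (the rewrite author's own statement) =====
-- stated objective: simpler
-- what changed: B replaces A's fill-then-patch mutable 2D grid (rows of '#'/'.' built first, then 'S' and the knots overwritten via abs-offset index arithmetic on a reversed enumeration) with min/max bounding-box computation, a knot dict built once with first-knot-wins, and a single per-cell priority choice (knot > S > visited > '.') while rendering.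
import Mathlib
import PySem

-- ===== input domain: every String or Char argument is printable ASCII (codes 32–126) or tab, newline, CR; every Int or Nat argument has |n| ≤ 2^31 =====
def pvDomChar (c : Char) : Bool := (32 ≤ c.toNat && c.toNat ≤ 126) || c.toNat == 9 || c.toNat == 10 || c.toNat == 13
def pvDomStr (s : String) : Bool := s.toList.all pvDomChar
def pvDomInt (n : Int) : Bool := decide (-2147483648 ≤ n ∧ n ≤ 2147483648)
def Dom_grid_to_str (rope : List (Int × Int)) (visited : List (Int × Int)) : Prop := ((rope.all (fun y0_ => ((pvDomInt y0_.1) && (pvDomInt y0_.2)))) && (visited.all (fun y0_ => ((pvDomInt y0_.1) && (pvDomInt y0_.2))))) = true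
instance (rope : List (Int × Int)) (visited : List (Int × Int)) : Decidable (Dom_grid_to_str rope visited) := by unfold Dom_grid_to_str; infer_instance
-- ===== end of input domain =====

-- B replaces A's fill-then-patch 2D grid (build rows of '#'/'.', then overwrite S and the
-- knots by index arithmetic) with min/max bounds, a first-knot-wins dict built once, and a
-- direct per-cell character choice; equivalence of the RETURN VALUE is proved for all inputs.

-- ===== PORT A =====
-- the if/elif bounds update of A's first loop
def pvBoundsStep (b : Int × Int × Int × Int) (p : Int × Int) : Int × Int × Int × Int :=
  let upper := b.1
  let right := b.2.1
  let lower := b.2.2.1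
  let left := b.2.2.2
  let row := p.1
  let col := p.2
  let (upper, lower) := if row > upper then (row, lower)
                        else if row < lower then (upper, row) else (upper, lower)
  let (right, left) := if col > right then (col, left)
                       else if col < left then (right, col) else (right, left)
  (upper, right, lower, left)

def grid_to_str (rope : List (Int × Int)) (visited : List (Int × Int)) : String :=
  let b := (rope ++ visited).foldl pvBoundsStep (0, 0, 0, 0)
  let upper := b.1
  let right := b.2.1
  let lower := b.2.2.1
  let left := b.2.2.2
  let offset_row := |lower|
  let offset_col := |left|
  let lines : List (List String) :=
    (PySem.List.pyRange lower (upper + 1) 1).foldl (fun lines row =>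
      let lines := lines ++ [([] : List String)]
      (PySem.List.pyRange left (right + 1) 1).foldl (fun lines col =>
        PySem.List.pySetD lines (row + offset_row)
          (PySem.List.pyGetD lines (row + offset_row) [] ++
            [if (row, col) ∈ visited then "#" else "."])) lines) []
  let lines := PySem.List.pySetD lines offset_row
      (PySem.List.pySetD (PySem.List.pyGetD lines offset_row []) offset_col "S")
  let lines := (PySem.List.enumerate rope.reverse 0).foldl (fun lines ip =>
      let row := ip.2.1
      let col := ip.2.2
      let v : Int := (rope.length : Int) - ip.1 - 1
      PySem.List.pySetD lines (row + offset_row)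
        (PySem.List.pySetD (PySem.List.pyGetD lines (row + offset_row) [])
          (col + offset_col) (if v ≠ 0 then PySem.Int.toStr v else "H"))) lines
  PySem.Str.join "\n" (lines.map (fun line => PySem.Str.join "" line))

-- ===== PORT B =====
def grid_to_str_alt (rope : List (Int × Int)) (visited : List (Int × Int)) : String :=
  let rowvals := rope.map Prod.fst ++ visited.map Prod.fst
  let colvals := rope.map Prod.snd ++ visited.map Prod.snd
  let lower := rowvals.foldl min 0
  let upper := rowvals.foldl max 0
  let left := colvals.foldl min 0
  let right := colvals.foldl max 0
  let knot : PySem.Dict (Int × Int) String :=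
    (PySem.List.enumerate rope 0).foldl (fun d vp =>
      if d.contains vp.2 then d
      else d.insert vp.2 (if vp.1 = 0 then "H" else PySem.Int.toStr vp.1)) PySem.Dict.empty
  let cell := fun (p : Int × Int) =>
    match knot.get? p with
    | some s => s
    | none => if p = (0, 0) then "S" else if p ∈ visited then "#" else "."
  PySem.Str.join "\n" ((PySem.List.pyRange lower (upper + 1) 1).map (fun r =>
    PySem.Str.join "" ((PySem.List.pyRange left (right + 1) 1).map (fun c => cell (r, c)))))

-- ===== PRECONDITION & SPEC =====
def Spec_grid_to_str (rope : List (Int × Int)) (visited : List (Int × Int)) (out : String) : Prop := out = grid_to_str_alt rope visited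
instance (rope : List (Int × Int)) (visited : List (Int × Int)) (out : String) : Decidable (Spec_grid_to_str rope visited out) := by unfold Spec_grid_to_str; infer_instance

-- ===== CLAIM (what is proved, stated in full; the proofs are below) =====
def Claim_equal_grid_to_str : Prop := ∀ (rope : List (Int × Int)) (visited : List (Int × Int)), Dom_grid_to_str rope visited → Spec_grid_to_str rope visited (grid_to_str rope visited)

-- ===== LEMMAS AND PROOFS =====

-- pointwise patch of a 2-argument function
def patchF (f : Int → Int → String) (p : Int × Int) (x : String) : Int → Int → String :=
  fun r c => if r = p.1 ∧ c = p.2 then x else f r c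

lemma bounds_fold : ∀ (l : List (Int × Int)) (u r lo le : Int), lo ≤ u → le ≤ r →
    List.foldl pvBoundsStep (u, r, lo, le) l =
      (List.foldl (fun a p => max a p.1) u l, List.foldl (fun a p => max a p.2) r l,
       List.foldl (fun a p => min a p.1) lo l, List.foldl (fun a p => min a p.2) le l)
  | [], u, r, lo, le, h1, h2 => rfl
  | (row, col) :: t, u, r, lo, le, h1, h2 => by
    simp only [List.foldl_cons]
    have e1 : pvBoundsStep (u, r, lo, le) (row, col) = (max u row, max r col, min lo row, min le col) := by
      simp only [pvBoundsStep]
      split_ifs <;> simp [Prod.ext_iff] <;> omega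
    rw [e1, bounds_fold t _ _ _ _ (by omega) (by omega)]

lemma init_le_foldl_max : ∀ (l : List Int) (a : Int), a ≤ l.foldl max a
  | [], a => le_refl a
  | x :: t, a => le_trans (le_max_left a x) (init_le_foldl_max t (max a x))

lemma foldl_min_le_init : ∀ (l : List Int) (a : Int), l.foldl min a ≤ a
  | [], a => le_refl a
  | x :: t, a => le_trans (foldl_min_le_init t (min a x)) (min_le_left a x)

lemma le_foldl_max : ∀ (l : List Int) (a x : Int), x ∈ l → x ≤ l.foldl max a := by
  intro l
  induction l with
  | nil => intro a x hx; simp at hx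
  | cons y t ih =>
    intro a x hx
    rcases List.mem_cons.mp hx with h | h
    · subst h; exact le_trans (le_max_right a x) (init_le_foldl_max t _)
    · exact ih _ _ h

lemma foldl_min_le : ∀ (l : List Int) (a x : Int), x ∈ l → l.foldl min a ≤ x := by
  intro l
  induction l with
  | nil => intro a x hx; simp at hx
  | cons y t ih =>
    intro a x hx
    rcases List.mem_cons.mp hx with h | h
    · subst h; exact le_trans (foldl_min_le_init t _) (min_le_right a x)
    · exact ih _ _ h

lemma set_concat_length {α : Type} (l : List α) (a b : α) : (l ++ [a]).set l.length b = l ++ [b] := by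
  induction l with
  | nil => rfl
  | cons x t ih => simp [ih]

lemma inner_fold (f : Int → String) (j : Int) :
    ∀ (cl : List Int) (L0 : List (List String)) (t : List String), j = (L0.length : Int) →
    cl.foldl (fun lines col => PySem.List.pySetD lines j
        (PySem.List.pyGetD lines j [] ++ [f col])) (L0 ++ [t])
      = L0 ++ [t ++ cl.map f] := by
  intro cl
  induction cl with
  | nil => intro L0 t hj; simp
  | cons c cs ih =>
    intro L0 t hj
    subst hj
    simp only [List.foldl_cons]
    have hget : PySem.List.pyGetD (L0 ++ [t]) (L0.length : Int) [] = t := by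
      rw [PySem.List.pyGetD_eq_getElem _ _ (by positivity) (by simp)]
      simp
    have hset : PySem.List.pySetD (L0 ++ [t]) (L0.length : Int) (t ++ [f c]) = L0 ++ [t ++ [f c]] := by
      rw [PySem.List.pySetD_natCast, set_concat_length]
    rw [hget, hset, ih L0 (t ++ [f c]) rfl]
    simp

lemma outer_fold (C : List Int) (g : Int → Int → String) (lower : Int) (o : Int) (ho : o = -lower) :
    ∀ (n : Nat) (a : Int), lower ≤ a →
    (PySem.List.pyRange a (a + n) 1).foldl
      (fun lines row =>
        C.foldl (fun lines col => PySem.List.pySetD lines (row + o)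
          (PySem.List.pyGetD lines (row + o) [] ++ [g row col])) (lines ++ [([] : List String)]))
      ((PySem.List.pyRange lower a 1).map (fun r => C.map (g r)))
    = (PySem.List.pyRange lower (a + n) 1).map (fun r => C.map (g r)) := by
  intro n
  induction n with
  | zero =>
    intro a ha
    simp
  | succ n ih =>
    intro a ha
    have hcons : PySem.List.pyRange a (a + (n+1:Nat)) 1 = a :: PySem.List.pyRange (a+1) (a + (n+1:Nat)) 1 :=
      PySem.List.pyRange_one_cons (by push_cast; omega)
    rw [hcons, List.foldl_cons]
    have hlen : a + o = (((PySem.List.pyRange lower a 1).map (fun r => C.map (g r))).length : Int) := by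
      simp [PySem.List.length_pyRange_one]; omega
    rw [hlen, inner_fold (fun col => g a col) _ C _ [] rfl]
    have hsucc : (PySem.List.pyRange lower a 1).map (fun r => C.map (g r)) ++ [[] ++ C.map (g a)] =
        (PySem.List.pyRange lower (a+1) 1).map (fun r => C.map (g r)) := by
      rw [PySem.List.pyRange_one_succ_right (by omega : lower ≤ a)]
      simp
    rw [hsucc]
    have harr : a + (n+1:Nat) = (a + 1) + (n:Nat) := by push_cast; omega
    rw [harr]
    exact ih (a+1) (by omega)

lemma patch_lemma (lower upper left right r0 c0 : Int) (g : Int → Int → String) (x : String)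
    (h1 : lower ≤ r0) (h2 : r0 ≤ upper) (h3 : left ≤ c0) (h4 : c0 ≤ right)
    (i j : Int) (hi : i = r0 - lower) (hj : j = c0 - left) :
    PySem.List.pySetD ((PySem.List.pyRange lower (upper + 1) 1).map (fun r => (PySem.List.pyRange left (right + 1) 1).map (g r))) i
      (PySem.List.pySetD (PySem.List.pyGetD ((PySem.List.pyRange lower (upper + 1) 1).map (fun r => (PySem.List.pyRange left (right + 1) 1).map (g r))) i []) j x)
    = (PySem.List.pyRange lower (upper + 1) 1).map (fun r => (PySem.List.pyRange left (right + 1) 1).map ((patchF g (r0, c0) x) r)) := by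
  subst hi hj
  have hRlen : (PySem.List.pyRange lower (upper + 1) 1).length = (upper + 1 - lower).toNat :=
    PySem.List.length_pyRange_one _ _
  have hClen : (PySem.List.pyRange left (right + 1) 1).length = (right + 1 - left).toNat :=
    PySem.List.length_pyRange_one _ _
  have hget : PySem.List.pyGetD ((PySem.List.pyRange lower (upper + 1) 1).map (fun r => (PySem.List.pyRange left (right + 1) 1).map (g r))) (r0 - lower) []
      = (PySem.List.pyRange left (right + 1) 1).map (g r0) := by
    rw [PySem.List.pyGetD_eq_getElem _ _ (by omega) (by rw [List.length_map, hRlen]; omega)]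
    rw [List.getElem_map]
    have hre : (PySem.List.pyRange lower (upper + 1) 1)[(r0 - lower).toNat]'(by rw [hRlen]; omega) = r0 := by
      rw [PySem.List.getElem_pyRange_one]; omega
    rw [hre]
  rw [hget, PySem.List.pySetD_of_nonneg _ _ (by omega), PySem.List.pySetD_of_nonneg _ _ (by omega)]
  apply List.ext_getElem
  · simp only [List.length_set, List.length_map]
  · intro k hk1 hk2
    rw [List.getElem_set, List.getElem_map, List.getElem_map]
    have hk2' : k < (PySem.List.pyRange lower (upper + 1) 1).length := by
      rw [List.length_map] at hk2; exact hk2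
    have hRk : (PySem.List.pyRange lower (upper + 1) 1)[k] = lower + k := PySem.List.getElem_pyRange_one _ _ _ hk2' 
    by_cases hk : (r0 - lower).toNat = k
    · rw [if_pos hk]
      have hr : (PySem.List.pyRange lower (upper + 1) 1)[k] = r0 := by rw [hRk]; omega
      rw [hr]
      apply List.ext_getElem
      · simp only [List.length_set, List.length_map]
      · intro m hm1 hm2
        rw [List.getElem_set, List.getElem_map, List.getElem_map]
        have hm2' : m < (PySem.List.pyRange left (right + 1) 1).length := by
          rw [List.length_map] at hm2; exact hm2
        have hCm : (PySem.List.pyRange left (right + 1) 1)[m] = left + m := PySem.List.getElem_pyRange_one _ _ _ hm2' 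
        by_cases hm : (c0 - left).toNat = m
        · rw [if_pos hm]
          have hcc : (PySem.List.pyRange left (right + 1) 1)[m] = c0 := by rw [hCm]; omega
          rw [hcc]
          simp [patchF]
        · rw [if_neg hm]
          simp only [patchF]
          rw [if_neg]
          rintro ⟨-, hc⟩
          rw [hCm] at hc
          have : m < (right + 1 - left).toNat := by rw [← hClen]; exact hm2' 
          omega
    · rw [if_neg hk]
      apply List.map_congr_left
      intro c _
      simp only [patchF]
      rw [if_neg]
      rintro ⟨hr, -⟩
      rw [hRk] at hr
      have : k < (upper + 1 - lower).toNat := by rw [← hRlen]; exact hk2' 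
      omega

lemma patches_fold (lower upper left right : Int) (o₁ o₂ : Int) (ho₁ : o₁ = -lower) (ho₂ : o₂ = -left) :
    ∀ (l : List ((Int × Int) × String)) (g : Int → Int → String),
    (∀ q ∈ l, lower ≤ q.1.1 ∧ q.1.1 ≤ upper ∧ left ≤ q.1.2 ∧ q.1.2 ≤ right) →
    l.foldl (fun lines q => PySem.List.pySetD lines (q.1.1 + o₁)
        (PySem.List.pySetD (PySem.List.pyGetD lines (q.1.1 + o₁) []) (q.1.2 + o₂) q.2))
      ((PySem.List.pyRange lower (upper + 1) 1).map (fun r => (PySem.List.pyRange left (right + 1) 1).map (g r)))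
    = (PySem.List.pyRange lower (upper + 1) 1).map (fun r =>
        (PySem.List.pyRange left (right + 1) 1).map ((l.foldl (fun f q => patchF f q.1 q.2) g) r)) := by
  intro l
  induction l with
  | nil => intro g _; simp
  | cons q t ih =>
    intro g h
    obtain ⟨hb1, hb2, hb3, hb4⟩ := h q (by simp)
    simp only [List.foldl_cons]
    rw [patch_lemma lower upper left right q.1.1 q.1.2 g q.2 hb1 hb2 hb3 hb4 _ _ (by omega) (by omega)]
    exact ih (patchF g q.1 q.2) (fun p hp => h p (List.mem_cons_of_mem _ hp))

lemma foldr_patch_eval (l : List ((Int × Int) × String)) (g : Int → Int → String) (r c : Int) :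
    (l.foldr (fun q f => patchF f q.1 q.2) g) r c =
      match l.find? (fun q => q.1 == (r, c)) with
      | some q => q.2
      | none => g r c := by
  induction l with
  | nil => simp
  | cons q t ih =>
    simp only [List.foldr_cons, List.find?_cons]
    by_cases h : q.1 = (r, c)
    · have hb : (q.1 == (r, c)) = true := by simp [h]
      simp only [hb, patchF]
      rw [if_pos]
      rw [h]
      exact ⟨rfl, rfl⟩
    · have hb : (q.1 == (r, c)) = false := by simp [h]
      simp only [hb, patchF]
      rw [if_neg]
      · exact ih
      · rintro ⟨h1, h2⟩
        exact h (Prod.ext_iff.mpr ⟨h1.symm, h2.symm⟩)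

lemma get?_setdefault_fold (labf : Int × (Int × Int) → String) :
    ∀ (l : List (Int × (Int × Int))) (d : PySem.Dict (Int × Int) String) (p : Int × Int),
    (l.foldl (fun d vp => if d.contains vp.2 then d else d.insert vp.2 (labf vp)) d).get? p
      = match d.get? p with
        | some s => some s
        | none => (l.find? (fun vp => vp.2 == p)).map labf := by
  intro l
  induction l with
  | nil =>
    intro d p
    simp only [List.foldl_nil, List.find?_nil, Option.map_none]
    cases d.get? p <;> rfl
  | cons vp t ih =>
    intro d p
    simp only [List.foldl_cons, List.find?_cons]
    by_cases hp : vp.2 = p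
    · have hbt : (vp.2 == p) = true := by simp [hp]
      by_cases hc : d.contains vp.2 = true
      · rw [if_pos hc, ih]
        have hsome : (d.get? p).isSome = true := by
          rw [← hp, ← PySem.Dict.contains_eq_isSome_get?]; exact hc
        cases hg : d.get? p with
        | none => rw [hg] at hsome; simp at hsome
        | some s => simp
      · rw [if_neg hc, ih]
        have hnone : d.get? p = none := by
          rw [PySem.Dict.contains_eq_isSome_get?] at hc
          rw [← hp]
          cases hg : d.get? vp.2
          · rfl
          · rw [hg] at hc; simp at hc
        have hins : (d.insert vp.2 (labf vp)).get? p = some (labf vp) := by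
          rw [← hp]; exact PySem.Dict.get?_insert_self d vp.2 (labf vp)
        rw [hins, hnone]
        simp [hbt]
    · have hbt : (vp.2 == p) = false := by simp [hp]
      by_cases hc : d.contains vp.2 = true
      · rw [if_pos hc, ih]
        simp [hbt]
      · rw [if_neg hc, ih]
        rw [PySem.Dict.get?_insert_of_ne d (labf vp) (fun h => hp h.symm)]
        simp [hbt]

lemma enum_rev (rope : List (Int × Int)) (lab : Int → String) :
    (PySem.List.enumerate rope.reverse 0).map (fun ip => (ip.2, lab ((rope.length : Int) - ip.1 - 1)))
      = ((PySem.List.enumerate rope 0).map (fun vp => (vp.2, lab vp.1))).reverse := by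
  apply List.ext_getElem
  · simp [PySem.List.length_enumerate]
  · intro k hk1 hk2
    have hklen : k < rope.length := by
      simpa [PySem.List.length_enumerate] using hk1
    rw [List.getElem_map, List.getElem_reverse, List.getElem_map]
    rw [PySem.List.getElem_enumerate, PySem.List.getElem_enumerate]
    rw [Prod.ext_iff]
    constructor
    · show (rope.reverse[k]'(by simpa using hklen)) = rope[_]'_
      rw [List.getElem_reverse]
      congr 1
      simp [PySem.List.length_enumerate]
    · show lab _ = lab _
      congr 1
      have h1 : (PySem.List.enumerate rope 0).length = rope.length := PySem.List.length_enumerate _ _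
      simp only [List.length_map, h1] at *
      omega

lemma rope_patches (lower upper left right o₁ o₂ : Int) (ho₁ : o₁ = -lower) (ho₂ : o₂ = -left)
    (rope : List (Int × Int)) (g : Int → Int → String)
    (hb : ∀ q ∈ rope, lower ≤ q.1 ∧ q.1 ≤ upper ∧ left ≤ q.2 ∧ q.2 ≤ right) :
    (PySem.List.enumerate rope.reverse 0).foldl (fun lines ip =>
        PySem.List.pySetD lines (ip.2.1 + o₁)
          (PySem.List.pySetD (PySem.List.pyGetD lines (ip.2.1 + o₁) []) (ip.2.2 + o₂)
            (if ((rope.length : Int) - ip.1 - 1) ≠ 0 then PySem.Int.toStr ((rope.length : Int) - ip.1 - 1) else "H")))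
      ((PySem.List.pyRange lower (upper + 1) 1).map (fun r => (PySem.List.pyRange left (right + 1) 1).map (g r)))
    = (PySem.List.pyRange lower (upper + 1) 1).map (fun r => (PySem.List.pyRange left (right + 1) 1).map
        ((((PySem.List.enumerate rope 0).map (fun vp => (vp.2, if vp.1 ≠ 0 then PySem.Int.toStr vp.1 else "H"))).foldr
            (fun q f => patchF f q.1 q.2) g) r)) := by
  have h1 : (PySem.List.enumerate rope.reverse 0).foldl (fun lines ip =>
        PySem.List.pySetD lines (ip.2.1 + o₁)
          (PySem.List.pySetD (PySem.List.pyGetD lines (ip.2.1 + o₁) []) (ip.2.2 + o₂)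
            (if ((rope.length : Int) - ip.1 - 1) ≠ 0 then PySem.Int.toStr ((rope.length : Int) - ip.1 - 1) else "H")))
      ((PySem.List.pyRange lower (upper + 1) 1).map (fun r => (PySem.List.pyRange left (right + 1) 1).map (g r)))
      = ((PySem.List.enumerate rope.reverse 0).map (fun ip =>
            (ip.2, if ((rope.length : Int) - ip.1 - 1) ≠ 0 then PySem.Int.toStr ((rope.length : Int) - ip.1 - 1) else "H"))).foldl
          (fun lines q => PySem.List.pySetD lines (q.1.1 + o₁)
            (PySem.List.pySetD (PySem.List.pyGetD lines (q.1.1 + o₁) []) (q.1.2 + o₂) q.2))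
          ((PySem.List.pyRange lower (upper + 1) 1).map (fun r => (PySem.List.pyRange left (right + 1) 1).map (g r))) := by
    rw [List.foldl_map]
  rw [h1]
  have h2 : ((PySem.List.enumerate rope.reverse 0).map (fun ip =>
        (ip.2, if ((rope.length : Int) - ip.1 - 1) ≠ 0 then PySem.Int.toStr ((rope.length : Int) - ip.1 - 1) else "H")))
      = (((PySem.List.enumerate rope 0).map (fun vp => (vp.2, if vp.1 ≠ 0 then PySem.Int.toStr vp.1 else "H")))).reverse :=
    enum_rev rope (fun v => if v ≠ 0 then PySem.Int.toStr v else "H")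
  rw [h2]
  rw [patches_fold lower upper left right o₁ o₂ ho₁ ho₂ _ g ?hb]
  case hb =>
    intro q hq
    rw [List.mem_reverse, List.mem_map] at hq
    obtain ⟨vp, hvp, rfl⟩ := hq
    rcases (PySem.List.mem_enumerate_iff rope 0 vp).mp hvp with ⟨k, hk, rfl⟩
    exact hb _ (List.getElem_mem hk)
  rw [List.foldl_reverse]

-- ===== VERDICT (by name: the statement is the Claim_ definition above) =====
theorem grid_to_str_spec : Claim_equal_grid_to_str := by
  intro rope visited _
  show grid_to_str rope visited = grid_to_str_alt rope visited
  simp only [grid_to_str, grid_to_str_alt]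
  rw [bounds_fold (rope ++ visited) 0 0 0 0 le_rfl le_rfl]
  dsimp only
  simp only [← List.map_append, List.foldl_map]
  set U := List.foldl (fun (a : Int) (p : Int × Int) => max a p.1) 0 (rope ++ visited) with hUdef
  set Rt := List.foldl (fun (a : Int) (p : Int × Int) => max a p.2) 0 (rope ++ visited) with hRtdef
  set L := List.foldl (fun (a : Int) (p : Int × Int) => min a p.1) 0 (rope ++ visited) with hLdef
  set Le := List.foldl (fun (a : Int) (p : Int × Int) => min a p.2) 0 (rope ++ visited) with hLedef
  have hfoldU : U = ((rope ++ visited).map Prod.fst).foldl max 0 := by rw [List.foldl_map, hUdef]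
  have hfoldRt : Rt = ((rope ++ visited).map Prod.snd).foldl max 0 := by rw [List.foldl_map, hRtdef]
  have hfoldL : L = ((rope ++ visited).map Prod.fst).foldl min 0 := by rw [List.foldl_map, hLdef]
  have hfoldLe : Le = ((rope ++ visited).map Prod.snd).foldl min 0 := by rw [List.foldl_map, hLedef]
  have hL0 : L ≤ 0 := by rw [hfoldL]; exact foldl_min_le_init _ 0
  have hLe0 : Le ≤ 0 := by rw [hfoldLe]; exact foldl_min_le_init _ 0
  have hU0 : (0:Int) ≤ U := by rw [hfoldU]; exact init_le_foldl_max _ 0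
  have hRt0 : (0:Int) ≤ Rt := by rw [hfoldRt]; exact init_le_foldl_max _ 0
  have hropeB : ∀ q ∈ rope, L ≤ q.1 ∧ q.1 ≤ U ∧ Le ≤ q.2 ∧ q.2 ≤ Rt := by
    intro q hq
    have h1 : q.1 ∈ (rope ++ visited).map Prod.fst := List.mem_map_of_mem (by simp [hq])
    have h2 : q.2 ∈ (rope ++ visited).map Prod.snd := List.mem_map_of_mem (by simp [hq])
    exact ⟨hfoldL ▸ foldl_min_le _ 0 _ h1, hfoldU ▸ le_foldl_max _ 0 _ h1,
           hfoldLe ▸ foldl_min_le _ 0 _ h2, hfoldRt ▸ le_foldl_max _ 0 _ h2⟩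
  rw [abs_of_nonpos hL0, abs_of_nonpos hLe0]
  have houter : List.foldl
      (fun lines row =>
        List.foldl
          (fun lines col =>
            PySem.List.pySetD lines (row + -L)
              (PySem.List.pyGetD lines (row + -L) [] ++ [if (row, col) ∈ visited then "#" else "."]))
          (lines ++ [[]]) (PySem.List.pyRange Le (Rt + 1) 1))
      [] (PySem.List.pyRange L (U + 1) 1)
    = (PySem.List.pyRange L (U + 1) 1).map (fun r => (PySem.List.pyRange Le (Rt + 1) 1).map
        ((fun row col => if (row, col) ∈ visited then "#" else ".") r)) := by
    have h0 := outer_fold (PySem.List.pyRange Le (Rt + 1) 1)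
        (fun row col => if (row, col) ∈ visited then "#" else ".") L (-L) rfl (U + 1 - L).toNat L le_rfl
    rw [PySem.List.pyRange_one_eq_nil (le_refl L), List.map_nil] at h0
    have harr : L + ((U + 1 - L).toNat : Int) = U + 1 := by omega
    rw [harr] at h0
    exact h0
  rw [houter]
  have hpatch := patch_lemma L U Le Rt 0 0
      (fun row col => if (row, col) ∈ visited then "#" else ".") "S" hL0 hU0 hLe0 hRt0
      (-L) (-Le) (by omega) (by omega)
  rw [hpatch]
  have hrope := rope_patches L U Le Rt (-L) (-Le) rfl rfl rope
      (patchF (fun row col => if (row, col) ∈ visited then "#" else ".") (0, 0) "S") hropeB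
  rw [hrope]
  rw [List.map_map]
  apply congrArg
  apply List.map_congr_left
  intro r hr
  show PySem.Str.join "" _ = PySem.Str.join "" _
  apply congrArg
  apply List.map_congr_left
  intro c hc
  rw [foldr_patch_eval]
  have hfind : ((PySem.List.enumerate rope 0).map
        (fun vp => (vp.2, if vp.1 ≠ 0 then PySem.Int.toStr vp.1 else "H"))).find?
          (fun q => q.1 == (r, c))
      = ((PySem.List.enumerate rope 0).find? (fun vp => vp.2 == (r, c))).map
          (fun vp => (vp.2, if vp.1 ≠ 0 then PySem.Int.toStr vp.1 else "H")) := by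
    rw [List.find?_map]
    rfl
  have hknot : (List.foldl
        (fun d vp => if d.contains vp.2 = true then d
          else d.insert vp.2 (if vp.1 = 0 then "H" else PySem.Int.toStr vp.1))
        PySem.Dict.empty (PySem.List.enumerate rope 0)).get? (r, c)
      = ((PySem.List.enumerate rope 0).find? (fun vp => vp.2 == (r, c))).map
          (fun vp => if vp.1 = 0 then "H" else PySem.Int.toStr vp.1) := by
    rw [get?_setdefault_fold (fun vp => if vp.1 = 0 then "H" else PySem.Int.toStr vp.1)
        (PySem.List.enumerate rope 0) PySem.Dict.empty (r, c)]
    rw [PySem.Dict.get?_empty]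
  rw [hfind, hknot]
  cases hf : (PySem.List.enumerate rope 0).find? (fun vp => vp.2 == (r, c)) with
  | none =>
    simp only [Option.map_none]
    simp [patchF, Prod.ext_iff]
  | some vp =>
    simp only [Option.map_some]
    by_cases h0 : vp.1 = 0 <;> simp [h0]
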